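-- pv_equiv track=rewrite | github.com/burning-calamity/op-message-encryptor-and-ecryptor | encripter.py | _column_order_from_key
-- ===== SOURCE A (Python) =====
-- def _column_order_from_key(key):
--     # produce order indexes: for key "ZEBRAS" returns order indexes for each column position
--     k = ''.join(ch for ch in key if ch.isalpha()).lower()
--     if not k:
--         raise ValueError("Columnar key must contain letters")
--     pairs = sorted([(ch, i) for i,ch in enumerate(k)])
--     order = [0]*len(k)
--     for rank,(_, idx) in enumerate(pairs):
--         order[idx] = rank
--     return order
-- ===== SOURCE B (Python) =====
-- def _column_order_from_key(key):
--     k = ''.join(ch for ch in key if ch.isalpha()).lower()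
--     if not k:
--         raise ValueError("Columnar key must contain letters")
--     return [sum(1 for j, d in enumerate(k) if d < c or (d == c and j < i))
--             for i, c in enumerate(k)]
-- ===== Notes on version B (the rewrite author's own statement) =====
-- stated objective: alternative
-- what changed: Replaces sort-then-scatter ranking with a direct per-position count of (char, index) pairs that compare lexicographically smaller, eliminating the sort and the index-writing loop.
import Mathlib
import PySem

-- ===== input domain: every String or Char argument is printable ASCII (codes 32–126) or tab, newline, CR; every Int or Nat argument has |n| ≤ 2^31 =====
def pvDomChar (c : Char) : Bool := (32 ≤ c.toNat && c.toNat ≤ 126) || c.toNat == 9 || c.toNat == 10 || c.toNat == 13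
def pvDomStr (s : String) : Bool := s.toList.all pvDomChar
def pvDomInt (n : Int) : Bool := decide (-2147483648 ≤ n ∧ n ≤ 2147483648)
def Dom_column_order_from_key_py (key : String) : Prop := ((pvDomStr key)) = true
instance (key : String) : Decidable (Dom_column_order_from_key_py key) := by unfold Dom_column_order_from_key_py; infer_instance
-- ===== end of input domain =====

-- B replaces A's sort-then-scatter ranking by a direct per-position count of lexicographically
-- smaller (char, index) pairs; a sort-free alternative of similar cost (no speed claim).

-- ===== PORT A =====
-- loop body of `for rank,(_, idx) in enumerate(pairs): order[idx] = rank`; idx always comes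
-- from enumerate, so it is ≥ 0 and `.toNat` is exact for Python's `order[idx] = rank`.
def pvScatter (order : List Int) (rp : Int × (Char × Int)) : List Int :=
  order.set rp.2.2.toNat rp.1

def column_order_from_key_py (key : String) : List Int :=
  -- k = ''.join(ch for ch in key if ch.isalpha()).lower()
  let k : List Char := PySem.Chars.lower (List.filter (fun ch => PySem.Chars.isalpha ch) key.toList)
  -- `if not k: raise ValueError(...)` — those inputs are excluded by Pre_ below
  -- pairs = sorted([(ch, i) for i,ch in enumerate(k)]); Python tuple comparison is the
  -- lexicographic order, i.e. the `Lex (Char × Int)` linear order used as the sort key.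
  let pairs : List (Char × Int) :=
    PySem.List.sorted ((PySem.List.enumerate k).map (fun p => (p.2, p.1)))
      (fun p => (toLex p : Lex (Char × Int)))
  -- order = [0]*len(k); for rank,(_, idx) in enumerate(pairs): order[idx] = rank
  (PySem.List.enumerate pairs).foldl pvScatter (List.replicate k.length (0 : Int))

-- ===== PORT B =====
def column_order_from_key_py_alt (key : String) : List Int :=
  let k : List Char := PySem.Chars.lower (List.filter (fun ch => PySem.Chars.isalpha ch) key.toList)
  -- `if not k: raise ValueError(...)` — excluded by Pre_ below
  -- [sum(1 for j, d in enumerate(k) if d < c or (d == c and j < i)) for i, c in enumerate(k)]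
  (PySem.List.enumerate k).map (fun p =>
    (((PySem.List.enumerate k).filter
        (fun q => decide (q.2 < p.2) || (q.2 == p.2 && decide (q.1 < p.1)))).map
      (fun _ => (1 : Int))).sum)

-- ===== PRECONDITION & SPEC =====
-- Pre_ excludes exactly the keys with no letter, on which Python A raises ValueError.
def Pre_column_order_from_key_py (key : String) : Prop :=
  (key.toList.any (fun ch => PySem.Chars.isalpha ch)) = true
instance (key : String) : Decidable (Pre_column_order_from_key_py key) := by
  unfold Pre_column_order_from_key_py; infer_instance

def pvWitness_column_order_from_key_py : String := "ZEBRAS"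

def Spec_column_order_from_key_py (key : String) (out : List Int) : Prop :=
  out = column_order_from_key_py_alt key
instance (key : String) (out : List Int) : Decidable (Spec_column_order_from_key_py key out) := by
  unfold Spec_column_order_from_key_py; infer_instance

-- ===== CLAIM (what is proved, stated in full; the proofs are below) =====
def Claim_equal_column_order_from_key_py : Prop :=
  ∀ (key : String), Dom_column_order_from_key_py key → Pre_column_order_from_key_py key →
    Spec_column_order_from_key_py key (column_order_from_key_py key)

-- ===== LEMMAS AND PROOFS =====

theorem pv_enum_length {α : Type} (l : List α) (s : Int) :
    (PySem.List.enumerate l s).length = l.length := by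
  induction l generalizing s with
  | nil => rfl
  | cons x t ih => simp [PySem.List.enumerate, ih (s + 1)]

theorem pv_enum_getElem {α : Type} (l : List α) (s : Int) (j : Nat) (hj : j < l.length) :
    (PySem.List.enumerate l s)[j]'(by rw [pv_enum_length]; exact hj) = (s + j, l[j]) := by
  induction l generalizing s j with
  | nil => simp at hj
  | cons x t ih =>
    cases j with
    | zero => simp [PySem.List.enumerate]
    | succ j =>
      have := ih (s + 1) j (by simpa using hj)
      simpa [PySem.List.enumerate, add_assoc, add_comm, add_left_comm] using this

theorem pv_enum_mem {α : Type} (l : List α) (s : Int) (p : Int × α) (hp : p ∈ PySem.List.enumerate l s) :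
    ∃ j : Nat, ∃ hj : j < l.length, p = (s + j, l[j]) := by
  obtain ⟨j, hj, hget⟩ := List.getElem_of_mem hp
  refine ⟨j, by rw [pv_enum_length] at hj; exact hj, ?_⟩
  rw [← hget, pv_enum_getElem]

theorem pv_enum_fst_nodup {α : Type} (l : List α) (s : Int) :
    ((PySem.List.enumerate l s).map (·.1)).Nodup := by
  induction l generalizing s with
  | nil => simp [PySem.List.enumerate]
  | cons x t ih =>
    refine List.nodup_cons.mpr ⟨?_, ih (s + 1)⟩
    intro hmem
    obtain ⟨p, hp, hp1⟩ := List.mem_map.mp hmem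
    obtain ⟨j, hj, rfl⟩ := pv_enum_mem t (s + 1) p hp
    simp at hp1
    omega

theorem pv_scatter_length (l : List (Int × (Char × Int))) (acc : List Int) :
    (l.foldl pvScatter acc).length = acc.length := by
  induction l generalizing acc with
  | nil => rfl
  | cons x t ih => simp [List.foldl_cons, ih, pvScatter]

theorem pv_scatter_getD (ys : List (Char × Int)) (s : Int) (acc : List Int) (i : Nat)
    (hnd : (ys.map (·.2)).Nodup) (hpos : ∀ p ∈ ys, 0 ≤ p.2) (hi : i < acc.length) :
    ((PySem.List.enumerate ys s).foldl pvScatter acc).getD i 0 =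
      match ys.findIdx? (fun p => p.2 == (i : Int)) with
      | some r => s + (r : Int)
      | none => acc.getD i 0 := by
  induction ys generalizing s acc with
  | nil => simp [PySem.List.enumerate]
  | cons p t ih =>
    simp only [List.map_cons, List.nodup_cons] at hnd
    have hpos' : ∀ q ∈ t, 0 ≤ q.2 := fun q hq => hpos q (List.mem_cons_of_mem _ hq)
    have hp0 : 0 ≤ p.2 := hpos p List.mem_cons_self
    have hstep : (PySem.List.enumerate (p :: t) s).foldl pvScatter acc =
        (PySem.List.enumerate t (s + 1)).foldl pvScatter (acc.set p.2.toNat s) := rfl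
    rw [hstep, List.findIdx?_cons]
    by_cases hpi : p.2 = (i : Int)
    · have hset : i < (acc.set p.2.toNat s).length := by simpa using hi
      have htnone : t.findIdx? (fun q => q.2 == (i : Int)) = none := by
        rw [List.findIdx?_eq_none_iff]
        intro q hq
        simp only [beq_eq_false_iff_ne, ne_eq]
        intro hq2
        exact hnd.1 (by rw [hpi, ← hq2]; exact List.mem_map_of_mem hq)
      rw [ih (s + 1) _ hnd.2 hpos' hset, htnone]
      have htoNat : p.2.toNat = i := by omega
      simp [hpi, List.getD, List.getElem?_set_self hi]
    · have hne : p.2.toNat ≠ i := by omega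
      have hset : i < (acc.set p.2.toNat s).length := by simpa using hi
      rw [ih (s + 1) _ hnd.2 hpos' hset]
      have hgd : (acc.set p.2.toNat s).getD i 0 = acc.getD i 0 := by
        simp [List.getD, List.getElem?_set_ne hne]
      simp only [beq_iff_eq, hpi, if_false]
      cases h : t.findIdx? (fun q => q.2 == (i : Int)) with
      | none => simp [List.getElem?_set_ne hne]
      | some r => simp; ring


theorem pv_countP_lt_key {α κ : Type} [LinearOrder κ] (key : α → κ) :
    ∀ (ys : List α), List.Pairwise (fun a b => key a < key b) ys →
    ∀ (r : Nat) (x : α), ys[r]? = some x →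
      ys.countP (fun p => decide (key p < key x)) = r := by
  intro ys hpw
  induction ys with
  | nil => intro r x hx; simp at hx
  | cons y t ih =>
    rw [List.pairwise_cons] at hpw
    intro r x hx
    cases r with
    | zero =>
      simp only [List.getElem?_cons_zero, Option.some.injEq] at hx
      subst hx
      have h1 : t.countP (fun p => decide (key p < key y)) = 0 := by
        rw [List.countP_eq_zero]
        intro a ha
        simp only [decide_eq_true_eq]
        exact not_lt_of_gt (hpw.1 a ha)
      rw [List.countP_cons, h1]
      simp
    | succ r =>
      simp only [List.getElem?_cons_succ] at hx
      have hmem : x ∈ t := List.mem_of_getElem? hx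
      have hy : key y < key x := hpw.1 _ hmem
      rw [List.countP_cons, ih hpw.2 r x hx]
      simp [hy]

theorem pv_main (k : List Char) :
    (PySem.List.enumerate
        (PySem.List.sorted ((PySem.List.enumerate k).map (fun p => (p.2, p.1)))
          (fun p => (toLex p : Lex (Char × Int))))).foldl pvScatter
      (List.replicate k.length (0 : Int)) =
    (PySem.List.enumerate k).map (fun p =>
      (((PySem.List.enumerate k).filter
          (fun q => decide (q.2 < p.2) || (q.2 == p.2 && decide (q.1 < p.1)))).map
        (fun _ => (1 : Int))).sum) := by
  set pairs0 : List (Char × Int) := (PySem.List.enumerate k).map (fun p => (p.2, p.1)) with hpairs0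
  set K : (Char × Int) → Lex (Char × Int) := fun p => (toLex p : Lex (Char × Int)) with hK
  set ys : List (Char × Int) := PySem.List.sorted pairs0 K with hys
  have hperm : ys.Perm pairs0 := PySem.List.sorted_perm pairs0 K false
  -- second components of pairs0 are the nodup enumerate indices
  have hmapsnd : pairs0.map (·.2) = (PySem.List.enumerate k).map (·.1) := by
    rw [hpairs0, List.map_map]; rfl
  have hnd0 : (pairs0.map (·.2)).Nodup := by rw [hmapsnd]; exact pv_enum_fst_nodup k 0
  have hndys : (ys.map (·.2)).Nodup := ((hperm.map (·.2)).nodup_iff).mpr hnd0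
  have hpos : ∀ p ∈ ys, 0 ≤ p.2 := by
    intro p hp
    have hp0 : p ∈ pairs0 := hperm.mem_iff.mp hp
    obtain ⟨q, hq, rfl⟩ := List.mem_map.mp hp0
    obtain ⟨j, hj, rfl⟩ := pv_enum_mem k 0 q hq
    simp
  -- strict sortedness of ys under K
  have hle : List.Pairwise (fun a b => K a ≤ K b) ys := PySem.List.sorted_pairwise pairs0 K
  have hndlist : ys.Nodup := (hperm.nodup_iff).mpr (List.Nodup.of_map _ hnd0)
  have hstrict : List.Pairwise (fun a b => K a < K b) ys := by
    refine (hle.and hndlist).imp ?_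
    intro a b hab
    exact lt_of_le_of_ne hab.1 (fun he => hab.2 (by
      have : (ofLex (K a) : Char × Int) = ofLex (K b) := by rw [he]
      simpa [hK] using this))
  -- lengths
  have hlenys : ys.length = k.length := by
    rw [hperm.length_eq, hpairs0, List.length_map, pv_enum_length]
  apply List.ext_getElem
  · rw [pv_scatter_length, List.length_replicate, List.length_map, pv_enum_length]
  · intro i h1 h2
    have hik : i < k.length := by
      simpa [pv_scatter_length, List.length_replicate] using h1
    -- LHS via the scatter lemma
    have hirep : i < (List.replicate k.length (0 : Int)).length := by simpa using hik
    have hscat := pv_scatter_getD ys 0 (List.replicate k.length (0 : Int)) i hndys hpos hirep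
    -- the pair with second component i
    have hmempair : ((k[i]'hik, (i : Int)) : Char × Int) ∈ ys := by
      rw [hperm.mem_iff]
      have : ((0 : Int) + (i : Nat), k[i]'hik) ∈ PySem.List.enumerate k 0 := by
        rw [← pv_enum_getElem k 0 i hik]
        exact List.getElem_mem _
      have h2' : ((k[i]'hik, (0 : Int) + (i : Nat)) : Char × Int) ∈ pairs0 := by
        rw [hpairs0]
        exact List.mem_map_of_mem this
      simpa using h2'
    -- findIdx? finds some index r
    have hfind : ∃ r, ys.findIdx? (fun p => p.2 == (i : Int)) = some r := by
      cases h : ys.findIdx? (fun p => p.2 == (i : Int)) with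
      | some r => exact ⟨r, rfl⟩
      | none =>
        exfalso
        have := (List.findIdx?_eq_none_iff.mp h) _ hmempair
        simp at this
    obtain ⟨r, hr⟩ := hfind
    obtain ⟨hrlt, hpred, -⟩ := List.findIdx?_eq_some_iff_getElem.mp hr
    -- identify ys[r]
    have hysr : (ys[r]'hrlt) = (k[i]'hik, (i : Int)) := by
      have hm : (ys[r]'hrlt) ∈ pairs0 := hperm.mem_iff.mp (List.getElem_mem hrlt)
      obtain ⟨q, hq, hqe⟩ := List.mem_map.mp hm
      obtain ⟨j, hj, rfl⟩ := pv_enum_mem k 0 q hq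
      have hsnd : (ys[r]'hrlt).2 = (i : Int) := by simpa using hpred
      have hji : j = i := by
        have : ((0 : Int) + (j : Nat)) = (i : Int) := by rw [← hqe] at hsnd; simpa using hsnd
        omega
      subst hji
      rw [← hqe]; simp
    -- LHS value
    rw [← List.getD_eq_getElem _ 0 h1, hscat, hr]
    -- RHS value
    have henum_i : (PySem.List.enumerate k)[i]'(by rw [pv_enum_length]; exact hik) =
        ((0 : Int) + (i : Nat), k[i]'hik) := pv_enum_getElem k 0 i hik
    rw [List.getElem_map, henum_i]
    -- turn the sum into a countP
    rw [PySem.List.sum_map_const_int, ← List.countP_eq_length_filter]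
    -- A's rank equals the countP over ys, then over pairs0, then over enumerate k
    have hrank := pv_countP_lt_key K ys hstrict r (ys[r]'hrlt)
      (by rw [List.getElem?_eq_getElem hrlt])
    have hcys : ys.countP (fun p => decide (K p < K (ys[r]'hrlt))) =
        pairs0.countP (fun p => decide (K p < K (ys[r]'hrlt))) :=
      hperm.countP_eq _
    have hcmap : pairs0.countP (fun p => decide (K p < K (ys[r]'hrlt))) =
        (PySem.List.enumerate k).countP
          (fun q => decide (q.2 < (k[i]'hik)) || (q.2 == (k[i]'hik) && decide (q.1 < (0 : Int) + (i : Nat)))) := by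
      rw [hpairs0, List.countP_map]
      apply List.countP_congr
      intro q hq
      rw [hysr]
      simp only [Function.comp]
      constructor
      · intro hlt
        have := Prod.Lex.lt_iff.mp (of_decide_eq_true hlt)
        simp only [hK, ofLex_toLex] at this
        rcases this with h | ⟨he, hlt2⟩
        · simp [h]
        · simp [he, hlt2]
      · intro hb
        apply decide_eq_true
        apply Prod.Lex.lt_iff.mpr
        simp only [hK, ofLex_toLex]
        rcases Bool.or_eq_true_iff.mp hb with h | h
        · exact Or.inl (of_decide_eq_true h)
        · obtain ⟨he, hlt2⟩ := Bool.and_eq_true_iff.mp h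
          exact Or.inr ⟨beq_iff_eq.mp he, by simpa using of_decide_eq_true hlt2⟩
    rw [hcys, hcmap] at hrank
    rw [← hrank]
    push_cast
    ring

-- ===== VERDICT (by name: the statement is the Claim_ definition above) =====
theorem column_order_from_key_py_spec : Claim_equal_column_order_from_key_py := by
  intro key _ _
  unfold Spec_column_order_from_key_py column_order_from_key_py column_order_from_key_py_alt
  exact pv_main _
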